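-- pv_equiv track=rewrite | github.com/2a46m4/aoc2022 | day10/day10.py | part2
-- ===== SOURCE A (Python) =====
-- def part2(input, reg, cycle):
--     res = ""
--     if len(input) == 0:
--         return res
--     if cycle == 0:
--         res += "\n"
--     if abs(reg - cycle) <= 1:
--         res += "#"
--     else: res += "."
--     return res + part2(input[1:], reg + input[0], (cycle + 1)%40)
-- ===== SOURCE B (Python) =====
-- def part2(input, reg, cycle):
--     out = []
--     for dx in input:
--         if cycle == 0:
--             out.append("\n")
--         out.append("#" if abs(reg - cycle) <= 1 else ".")
--         reg += dx
--         cycle = (cycle + 1) % 40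
--     return "".join(out)
-- ===== Notes on version B (the rewrite author's own statement) =====
-- stated objective: faster
-- what changed: Replaced the O(n^2) recursion that slices input[1:] at every step with a single iterative pass that appends pixel chunks to a list and joins once at the end.
import Mathlib
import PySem

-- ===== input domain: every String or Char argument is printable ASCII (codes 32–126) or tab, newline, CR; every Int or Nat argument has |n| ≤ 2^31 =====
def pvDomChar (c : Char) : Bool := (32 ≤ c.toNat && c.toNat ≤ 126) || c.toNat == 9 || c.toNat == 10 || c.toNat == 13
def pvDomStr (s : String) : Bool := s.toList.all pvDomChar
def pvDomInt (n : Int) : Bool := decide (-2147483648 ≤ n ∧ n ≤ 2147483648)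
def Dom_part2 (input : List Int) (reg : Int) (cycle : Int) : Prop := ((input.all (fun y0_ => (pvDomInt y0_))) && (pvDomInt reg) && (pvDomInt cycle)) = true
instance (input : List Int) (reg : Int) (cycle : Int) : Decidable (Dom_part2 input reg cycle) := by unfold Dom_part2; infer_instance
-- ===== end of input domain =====

-- B replaces A's O(n^2) slicing recursion with a single iterative pass that appends chunks and joins once.

-- ===== PORT A =====
def part2 (input : List Int) (reg : Int) (cycle : Int) : String :=
  match input with
  | [] => ""
  | x :: rest =>
    let res : String := ""
    let res := if cycle == 0 then res ++ "\n" else res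
    let res := if |reg - cycle| ≤ 1 then res ++ "#" else res ++ "."
    res ++ part2 rest (reg + x) (PySem.Int.mod (cycle + 1) 40)

-- ===== PORT B =====
-- one step of B's loop body: state is (out, reg, cycle)
def part2AltStep (st : List String × Int × Int) (dx : Int) : List String × Int × Int :=
  let (out, reg, cycle) := st
  let out := if cycle == 0 then out ++ ["\n"] else out
  let out := out ++ [if |reg - cycle| ≤ 1 then "#" else "."]
  (out, reg + dx, PySem.Int.mod (cycle + 1) 40)

def part2_alt (input : List Int) (reg : Int) (cycle : Int) : String :=
  PySem.Str.join "" (input.foldl part2AltStep ([], reg, cycle)).1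

-- ===== PRECONDITION & SPEC =====
def Spec_part2 (input : List Int) (reg : Int) (cycle : Int) (out : String) : Prop := out = part2_alt input reg cycle
instance (input : List Int) (reg : Int) (cycle : Int) (out : String) : Decidable (Spec_part2 input reg cycle out) := by unfold Spec_part2; infer_instance

-- ===== CLAIM (what is proved, stated in full; the proofs are below) =====
def Claim_equal_part2 : Prop := ∀ (input : List Int) (reg : Int) (cycle : Int), Dom_part2 input reg cycle → Spec_part2 input reg cycle (part2 input reg cycle)

-- ===== LEMMAS AND PROOFS =====

theorem nil_intercalate (l : List (List Char)) : [].intercalate l = l.flatten := by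
  induction l with
  | nil => simp [List.intercalate]
  | cons x r ih => cases r <;> simp_all [List.intercalate, List.intersperse]

theorem join_empty_append (a b : List String) :
    PySem.Str.join "" (a ++ b) = PySem.Str.join "" a ++ PySem.Str.join "" b := by
  simp [PySem.Str.join, PySem.Chars.join, nil_intercalate]

theorem part2_join_loop (input : List Int) :
    ∀ (out : List String) (reg cycle : Int),
      PySem.Str.join "" (input.foldl part2AltStep (out, reg, cycle)).1
        = PySem.Str.join "" out ++ part2 input reg cycle := by
  induction input with
  | nil =>
    intro out reg cycle
    simp [part2]
  | cons x rest ih =>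
    intro out reg cycle
    rw [List.foldl_cons]
    show PySem.Str.join "" (rest.foldl part2AltStep (part2AltStep (out, reg, cycle) x)).1
        = PySem.Str.join "" out ++ part2 (x :: rest) reg cycle
    simp only [part2AltStep, part2]
    by_cases hc : cycle = 0 <;> by_cases hr : |reg - cycle| ≤ 1 <;>
      simp only [hc, hr, if_pos, if_neg, not_false_iff, beq_iff_eq] <;>
      rw [ih, join_empty_append] <;>
      simp [PySem.Str.join, PySem.Chars.join, nil_intercalate, String.append_assoc] <;>
      split_ifs <;> first
        | omega
        | (rw [← String.append_assoc]; rfl)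

-- ===== VERDICT (by name: the statement is the Claim_ definition above) =====
theorem part2_spec : Claim_equal_part2 := by
  intro input reg cycle _
  unfold Spec_part2 part2_alt
  rw [part2_join_loop]
  simp [PySem.Str.join]
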